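-- pv_equiv track=rewrite | github.com/adhithyan15/coding-adventures | code/programs/python/unix-tools/paste_tool.py | paste_parallel
-- ===== SOURCE A (Python) =====
-- def paste_parallel(
--     file_contents: list[list[str]],
--     delimiters: str = "\t",
-- ) -> list[str]:
--     """Merge lines from multiple files in parallel (the default mode).
--
--     For each line number, we take one line from each file and join
--     them with the delimiter(s). If a file has fewer lines, its
--     contribution is an empty string.
--
--     Args:
--         file_contents: A list of lists, where each inner list is the
--                        lines from one file (newlines stripped).
--         delimiters: The delimiter string. Characters are cycled through
--                     when there are more than 2 files.
--
--     Returns: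
--         The merged output lines.
--     """
--     if not file_contents:
--         return []
--
--     # Find the maximum number of lines across all files.
--     max_lines = max(len(fc) for fc in file_contents)
--     result: list[str] = []
--
--     for line_idx in range(max_lines):
--         parts: list[str] = []
--         for file_idx, fc in enumerate(file_contents):
--             if file_idx > 0:
--                 # Pick the delimiter using round-robin.
--                 delim_idx = (file_idx - 1) % len(delimiters)
--                 parts.append(delimiters[delim_idx])
--             if line_idx < len(fc):
--                 parts.append(fc[line_idx])
--             else:
--                 parts.append("")
--         result.append("".join(parts))
--
--     return result
-- ===== SOURCE B (Python) =====
-- def paste_parallel(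
--     file_contents: list[list[str]],
--     delimiters: str = "\t",
-- ) -> list[str]:
--     """Column-wise merge: fold files left to right into one running list of
--     merged lines, instead of building each output line index by index."""
--     if not file_contents:
--         return []
--     merged = list(file_contents[0])
--     pad = ""  # what a fully-missing row of the files merged so far looks like
--     for file_idx in range(1, len(file_contents)):
--         fc = file_contents[file_idx]
--         d = delimiters[(file_idx - 1) % len(delimiters)]
--         n = max(len(merged), len(fc))
--         merged = [
--             (merged[i] if i < len(merged) else pad)
--             + d
--             + (fc[i] if i < len(fc) else "")
--             for i in range(n)
--         ]
--         pad = pad + d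
--     return merged
-- ===== Notes on version B (the rewrite author's own statement) =====
-- stated objective: alternative
-- what changed: Replaces A's per-output-line inner scan over all files (range(max_lines) outer loop, enumerate inner loop joining parts) with a single left fold over the files that maintains one running list of merged lines plus a padding prefix for rows missing from earlier files (column-wise merge).
-- outside the precondition, e.g. on paste_parallel([[], []], ''): A returns [], B raises ZeroDivisionError; on paste_parallel([['a'], ['b']], ''): A raises ZeroDivisionError, B raises ZeroDivisionError
import Mathlib
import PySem

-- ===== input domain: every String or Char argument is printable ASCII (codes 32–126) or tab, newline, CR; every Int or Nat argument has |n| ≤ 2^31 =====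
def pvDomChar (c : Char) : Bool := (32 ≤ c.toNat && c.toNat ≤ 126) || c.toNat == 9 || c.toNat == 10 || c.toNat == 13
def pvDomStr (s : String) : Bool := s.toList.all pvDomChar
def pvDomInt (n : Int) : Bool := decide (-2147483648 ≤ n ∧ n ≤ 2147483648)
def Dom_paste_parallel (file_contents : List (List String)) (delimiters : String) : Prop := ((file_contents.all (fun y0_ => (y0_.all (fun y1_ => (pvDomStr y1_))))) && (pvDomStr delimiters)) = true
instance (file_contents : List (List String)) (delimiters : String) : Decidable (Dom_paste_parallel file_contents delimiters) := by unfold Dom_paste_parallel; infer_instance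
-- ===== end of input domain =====

-- B replaces A's per-output-line inner scan over all files by a single left fold over the
-- files that maintains one running list of merged lines (column-wise merge); objective:
-- alternative decomposition, same asymptotic cost.

-- delimiters[(k - 1) % len(delimiters)] — this exact expression occurs in both Pythons;
-- none (IndexError/ZeroDivisionError territory, excluded by Pre_) is mapped to ""
def pvDelim (delimiters : String) (k : Nat) : String :=
  match PySem.Str.pyGet? delimiters (PySem.Int.mod ((k : Int) - 1) (PySem.Str.len delimiters)) with
  | some c => String.singleton c
  | none => ""

-- ===== PORT A =====
-- A's inner loop body: for (fc, file_idx), append the delimiter (if file_idx > 0) and then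
-- the line part (fc[line_idx] if in range else "")
def pvPartsA (delimiters : String) (lineIdx : Nat) (parts : List String) (p : List String × Nat) : List String :=
  parts ++ (if p.2 > 0 then [pvDelim delimiters p.2] else []) ++ [p.1.getD lineIdx ""]

def paste_parallel (file_contents : List (List String)) (delimiters : String) : List String :=
  if file_contents = [] then []
  else
    let maxLines := (file_contents.map List.length).foldl Nat.max 0
    (List.range maxLines).map (fun lineIdx =>
      String.join (file_contents.zipIdx.foldl (pvPartsA delimiters lineIdx) []))

-- ===== PORT B =====
-- B's loop body: extend every merged line so far (padding missing ones with `pad`) by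
-- this file's delimiter and this file's line
def pvStepB (delimiters : String) (st : List String × String) (p : List String × Nat) : List String × String :=
  let d := pvDelim delimiters p.2
  let n := Nat.max st.1.length p.1.length
  ((List.range n).map (fun i =>
      (if i < st.1.length then st.1.getD i "" else st.2) ++ d ++ p.1.getD i ""),
   st.2 ++ d)

def paste_parallel_alt (file_contents : List (List String)) (delimiters : String) : List String :=
  match file_contents with
  | [] => []
  | f0 :: rest => ((rest.zipIdx 1).foldl (pvStepB delimiters) (f0, "")).1

-- ===== PRECONDITION & SPEC =====
-- Pre_ excludes the empty delimiter string with two or more files: there Python A raises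
-- ZeroDivisionError except in the degenerate all-files-empty case (where A returns []),
-- and Python B's eager per-file delimiter lookup raises ZeroDivisionError in every case.
def Pre_paste_parallel (file_contents : List (List String)) (delimiters : String) : Prop :=
  delimiters.toList ≠ [] ∨ file_contents.length ≤ 1
instance (file_contents : List (List String)) (delimiters : String) : Decidable (Pre_paste_parallel file_contents delimiters) := by unfold Pre_paste_parallel; infer_instance
def pvWitness_paste_parallel : List (List String) × String := ([["a", "b"], ["c"]], "\t")

def Spec_paste_parallel (file_contents : List (List String)) (delimiters : String) (out : List String) : Prop := out = paste_parallel_alt file_contents delimiters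
instance (file_contents : List (List String)) (delimiters : String) (out : List String) : Decidable (Spec_paste_parallel file_contents delimiters out) := by unfold Spec_paste_parallel; infer_instance

-- ===== CLAIM (what is proved, stated in full; the proofs are below) =====
def Claim_equal_paste_parallel : Prop := ∀ (file_contents : List (List String)) (delimiters : String), Dom_paste_parallel file_contents delimiters → Pre_paste_parallel file_contents delimiters → Spec_paste_parallel file_contents delimiters (paste_parallel file_contents delimiters)

-- ===== LEMMAS AND PROOFS =====

-- the line produced for line number lineIdx from the files g (g starting at file index k)
def rowSpec (delimiters : String) (lineIdx : Nat) : List (List String) → Nat → String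
  | [], _ => ""
  | f :: fs, k => (if k > 0 then pvDelim delimiters k else "") ++ f.getD lineIdx "" ++ rowSpec delimiters lineIdx fs (k + 1)

-- the line produced when every file's contribution is empty: just the delimiters
def padSpec (delimiters : String) : List (List String) → Nat → String
  | [], _ => ""
  | _ :: fs, k => (if k > 0 then pvDelim delimiters k else "") ++ padSpec delimiters fs (k + 1)

def maxlen (g : List (List String)) : Nat := (g.map List.length).foldl Nat.max 0

def mergedSpec (delimiters : String) (g : List (List String)) : List String :=
  (List.range (maxlen g)).map (fun i => rowSpec delimiters i g 0)

lemma foldl_app (l : List String) :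
    ∀ a : String, l.foldl (fun r s => r ++ s) a = a ++ l.foldl (fun r s => r ++ s) "" := by
  induction l with
  | nil => simp
  | cons x xs ih => intro a; simp only [List.foldl_cons]; rw [ih (a ++ x), ih ("" ++ x)]; simp [String.append_assoc]

lemma join_append (l1 l2 : List String) :
    String.join (l1 ++ l2) = String.join l1 ++ String.join l2 := by
  simp only [String.join, List.foldl_append]; rw [foldl_app]

-- A's inner foldl over (file, index) pairs joins to rowSpec
lemma joinA (delimiters : String) (lineIdx : Nat) :
    ∀ (g : List (List String)) (k : Nat) (acc : List String),
      String.join ((g.zipIdx k).foldl (pvPartsA delimiters lineIdx) acc)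
        = String.join acc ++ rowSpec delimiters lineIdx g k := by
  intro g
  induction g with
  | nil => intro k acc; simp [rowSpec]
  | cons f fs ih =>
    intro k acc
    rw [List.zipIdx_cons, List.foldl_cons, ih]
    simp only [pvPartsA, rowSpec, join_append]
    split_ifs <;> simp [String.join, String.append_assoc]

lemma rowSpec_snoc (d : String) (i : Nat) (f : List String) :
    ∀ (g : List (List String)) (k : Nat),
      rowSpec d i (g ++ [f]) k
        = rowSpec d i g k ++ (if k + g.length > 0 then pvDelim d (k + g.length) else "") ++ f.getD i "" := by
  intro g
  induction g with
  | nil => intro k; simp [rowSpec]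
  | cons x xs ih =>
    intro k
    simp only [List.cons_append, rowSpec, ih (k + 1), List.length_cons]
    have : k + 1 + xs.length = k + (xs.length + 1) := by omega
    rw [this]
    simp [String.append_assoc]

lemma padSpec_snoc (d : String) (f : List String) :
    ∀ (g : List (List String)) (k : Nat),
      padSpec d (g ++ [f]) k = padSpec d g k ++ (if k + g.length > 0 then pvDelim d (k + g.length) else "") := by
  intro g
  induction g with
  | nil => intro k; simp [padSpec]
  | cons x xs ih =>
    intro k
    simp only [List.cons_append, padSpec, ih (k + 1), List.length_cons]
    have : k + 1 + xs.length = k + (xs.length + 1) := by omega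
    rw [this]
    simp [String.append_assoc]

lemma rowSpec_pad (d : String) (i : Nat) :
    ∀ (g : List (List String)) (k : Nat), (∀ f ∈ g, f.length ≤ i) →
      rowSpec d i g k = padSpec d g k := by
  intro g
  induction g with
  | nil => intro k _; rfl
  | cons x xs ih =>
    intro k h
    simp only [rowSpec, padSpec, ih (k + 1) (fun f hf => h f (List.mem_cons_of_mem _ hf)),
      List.getD_eq_default _ _ (h x List.mem_cons_self)]
    simp

lemma le_maxlen (g : List (List String)) (f : List String) (hf : f ∈ g) : f.length ≤ maxlen g := by
  unfold maxlen
  rw [List.foldl_map]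
  exact (PySem.List.le_foldl_max_nat g List.length 0).2 f hf

lemma maxlen_snoc (g : List (List String)) (f : List String) :
    maxlen (g ++ [f]) = Nat.max (maxlen g) f.length := by
  simp [maxlen, List.foldl_append]

lemma mergedSpec_single (d : String) (f0 : List String) : mergedSpec d [f0] = f0 := by
  have hm : maxlen [f0] = f0.length := by simp [maxlen]
  unfold mergedSpec
  rw [hm]
  apply List.ext_getElem
  · simp
  · intro i h1 h2
    simp only [List.getElem_map, List.getElem_range]
    simp [rowSpec, List.getD_eq_getElem?_getD, List.getElem?_eq_getElem h2]

-- one step of B's fold turns the merged lines of the prefix g into those of g ++ [f]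
lemma stepB_spec (d : String) (g : List (List String)) (hg : g ≠ []) (f : List String) :
    pvStepB d (mergedSpec d g, padSpec d g 0) (f, g.length)
      = (mergedSpec d (g ++ [f]), padSpec d (g ++ [f]) 0) := by
  have hlen : (mergedSpec d g).length = maxlen g := by simp [mergedSpec]
  have hpos : g.length > 0 := List.length_pos_of_ne_nil hg
  unfold pvStepB
  simp only [hlen]
  apply Prod.ext
  · show List.map _ _ = _
    unfold mergedSpec
    rw [maxlen_snoc]
    apply List.map_congr_left
    intro i hi
    rw [rowSpec_snoc d i f g 0]
    have hif : 0 + g.length > 0 := by omega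
    rw [if_pos hif]
    simp only [Nat.zero_add]
    by_cases h : i < maxlen g
    · rw [if_pos h]
      have : (List.map (fun i => rowSpec d i g 0) (List.range (maxlen g))).getD i "" = rowSpec d i g 0 := by
        rw [List.getD_eq_getElem?_getD]
        simp [List.getElem?_map, List.getElem?_range h]
      rw [this]
    · rw [if_neg h]
      rw [rowSpec_pad d i g 0 (fun f' hf' => le_trans (le_maxlen g f' hf') (by omega))]
  · show _ ++ _ = _
    rw [padSpec_snoc d f g 0, if_pos (by omega : 0 + g.length > 0)]
    simp

lemma B_inv (delimiters : String) :
    ∀ (rest g : List (List String)), g ≠ [] →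
      (rest.zipIdx g.length).foldl (pvStepB delimiters) (mergedSpec delimiters g, padSpec delimiters g 0)
        = (mergedSpec delimiters (g ++ rest), padSpec delimiters (g ++ rest) 0) := by
  intro rest
  induction rest with
  | nil => intro g hg; simp
  | cons r rs ih =>
    intro g hg
    rw [List.zipIdx_cons, List.foldl_cons, stepB_spec delimiters g hg r]
    have h1 : g.length + 1 = (g ++ [r]).length := by simp
    rw [h1, ih (g ++ [r]) (by simp)]
    simp

-- ===== VERDICT (by name: the statement is the Claim_ definition above) =====
theorem paste_parallel_spec : Claim_equal_paste_parallel := by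
  intro fc d _ _
  unfold Spec_paste_parallel
  cases fc with
  | nil => rfl
  | cons f0 rest =>
    show (if (f0 :: rest) = [] then [] else _) = _
    rw [if_neg (by simp)]
    have hB : paste_parallel_alt (f0 :: rest) d = mergedSpec d (f0 :: rest) := by
      show ((rest.zipIdx 1).foldl (pvStepB d) (f0, "")).1 = _
      have h0 : (f0, ("" : String)) = (mergedSpec d [f0], padSpec d [f0] 0) := by
        rw [mergedSpec_single]; simp [padSpec]
      have h1 : (1 : Nat) = [f0].length := by simp
      rw [h0, h1, B_inv d rest [f0] (by simp)]
      simp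
    rw [hB]
    unfold mergedSpec
    apply List.map_congr_left
    intro i hi
    rw [joinA d i (f0 :: rest) 0 []]
    simp [String.join]
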